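-- pv_equiv track=rewrite | github.com/Miju-Ahmed/Computer_Graphics | Lab/Bresenham_Circle.py | Bresenham_circle
-- ===== SOURCE A (Python) =====
-- def plot_circle_points(xc,yc,x,y,points):
--     points.extend([
--         (xc + x, yc + y),
--         (xc - x, yc + y),
--         (xc + x, yc - y),
--         (xc - x, yc - y),
--         (xc + y, yc + x),
--         (xc - y, yc + x),
--         (xc + y, yc - x),
--         (xc - y, yc - x)
--     ])
--
-- def Bresenham_circle(xc,yc,r):
--     x=0
--     y=r
--     d=3-2*r
--     points=[]
--     while x<=y:
--         plot_circle_points(xc,yc,x,y,points)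
--         if d<0:
--             d=d+4*x+6
--         else:
--             d=d+4*(x-y)+10
--             y=y-1
--         x+=1
--     return points
-- ===== SOURCE B (Python) =====
-- def _isqrt(n):
--     # binary search for floor(sqrt(n)), n >= 0: invariant lo*lo <= n < hi*hi
--     lo = 0
--     hi = n + 1
--     while hi - lo > 1:
--         mid = (lo + hi) // 2
--         if mid * mid <= n:
--             lo = mid
--         else:
--             hi = mid
--     return lo
--
-- def Bresenham_circle(xc, yc, r):
--     if r < 0:
--         return []
--     points = []
--     x = 0
--     while True:
--         s = r * r - x * x
--         if s < 0:
--             break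
--         y = (_isqrt(4 * s) + 1) // 2
--         if x > y:
--             break
--         points.extend([
--             (xc + x, yc + y),
--             (xc - x, yc + y),
--             (xc + x, yc - y),
--             (xc - x, yc - y),
--             (xc + y, yc + x),
--             (xc - y, yc + x),
--             (xc + y, yc - x),
--             (xc - y, yc - x)
--         ])
--         x += 1
--     return points
-- ===== Notes on version B (the rewrite author's own statement) =====
-- stated objective: alternative
-- what changed: Replaces the incremental Bresenham decision variable d and the if/else y-update with direct geometry: each y is recomputed from the circle equation as (isqrt(4*(r*r-x*x))+1)//2 (a hand-rolled binary-search integer square root, since A imports nothing), looping x while x <= y.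
import Mathlib
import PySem

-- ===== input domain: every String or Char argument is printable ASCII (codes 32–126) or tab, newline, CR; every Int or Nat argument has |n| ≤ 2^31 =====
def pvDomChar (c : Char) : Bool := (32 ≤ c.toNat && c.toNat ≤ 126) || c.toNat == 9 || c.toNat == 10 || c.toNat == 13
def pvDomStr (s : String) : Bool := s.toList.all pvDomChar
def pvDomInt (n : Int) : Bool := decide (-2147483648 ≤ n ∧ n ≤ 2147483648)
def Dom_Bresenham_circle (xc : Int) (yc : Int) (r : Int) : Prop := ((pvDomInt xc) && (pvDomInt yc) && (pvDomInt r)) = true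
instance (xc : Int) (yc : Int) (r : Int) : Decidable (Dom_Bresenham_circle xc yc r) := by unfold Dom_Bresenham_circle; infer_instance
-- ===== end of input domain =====

-- B replaces the incremental decision variable d by recomputing y from the circle
-- equation with an integer square root each step (alternative decomposition, not claimed faster).

-- ===== PORT A =====
def plot_circle_points (xc yc x y : Int) (points : List (Int × Int)) : List (Int × Int) :=
  points ++ [(xc + x, yc + y), (xc - x, yc + y), (xc + x, yc - y), (xc - x, yc - y),
             (xc + y, yc + x), (xc - y, yc + x), (xc + y, yc - x), (xc - y, yc - x)]

def bresLoopA (xc yc : Int) (x y d : Int) (points : List (Int × Int)) : List (Int × Int) :=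
  if h : x ≤ y then
    let pts := plot_circle_points xc yc x y points
    if d < 0 then bresLoopA xc yc (x + 1) y (d + 4 * x + 6) pts
    else bresLoopA xc yc (x + 1) (y - 1) (d + 4 * (x - y) + 10) pts
  else points
termination_by (y - x + 1).toNat
decreasing_by all_goals omega

def Bresenham_circle (xc : Int) (yc : Int) (r : Int) : List (Int × Int) :=
  bresLoopA xc yc 0 r (3 - 2 * r) []

-- ===== PORT B =====
-- binary-search integer square root (port of Source B's hand-rolled _isqrt)
def isqGo (n lo hi : Int) : Int :=
  if _h : hi - lo > 1 then
    if PySem.Int.floordiv (lo + hi) 2 * PySem.Int.floordiv (lo + hi) 2 ≤ n then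
      isqGo n (PySem.Int.floordiv (lo + hi) 2) hi
    else isqGo n lo (PySem.Int.floordiv (lo + hi) 2)
  else lo
termination_by (hi - lo).toNat
decreasing_by
  all_goals
    rw [PySem.Int.floordiv_eq_ediv_of_pos (by norm_num)]
    omega

def isqrtB (n : Int) : Int := isqGo n 0 (n + 1)

-- the 'while True' loop of Source B; the fuel argument is only a totality guard
-- (the loop body stops via the two breaks well before r.toNat + 2 iterations)
def bresLoopB (xc yc r : Int) : Nat → Int → List (Int × Int) → List (Int × Int)
  | 0, _, points => points
  | fuel + 1, x, points =>
    if r * r - x * x < 0 then points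
    else
      if x > PySem.Int.floordiv (isqrtB (4 * (r * r - x * x)) + 1) 2 then points
      else bresLoopB xc yc r fuel (x + 1)
        (points ++
          [(xc + x, yc + PySem.Int.floordiv (isqrtB (4 * (r * r - x * x)) + 1) 2),
           (xc - x, yc + PySem.Int.floordiv (isqrtB (4 * (r * r - x * x)) + 1) 2),
           (xc + x, yc - PySem.Int.floordiv (isqrtB (4 * (r * r - x * x)) + 1) 2),
           (xc - x, yc - PySem.Int.floordiv (isqrtB (4 * (r * r - x * x)) + 1) 2),
           (xc + PySem.Int.floordiv (isqrtB (4 * (r * r - x * x)) + 1) 2, yc + x),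
           (xc - PySem.Int.floordiv (isqrtB (4 * (r * r - x * x)) + 1) 2, yc + x),
           (xc + PySem.Int.floordiv (isqrtB (4 * (r * r - x * x)) + 1) 2, yc - x),
           (xc - PySem.Int.floordiv (isqrtB (4 * (r * r - x * x)) + 1) 2, yc - x)])

def Bresenham_circle_alt (xc : Int) (yc : Int) (r : Int) : List (Int × Int) :=
  if r < 0 then [] else bresLoopB xc yc r (r.toNat + 2) 0 []

-- ===== PRECONDITION & SPEC =====
def Spec_Bresenham_circle (xc : Int) (yc : Int) (r : Int) (out : List (Int × Int)) : Prop := out = Bresenham_circle_alt xc yc r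
instance (xc : Int) (yc : Int) (r : Int) (out : List (Int × Int)) : Decidable (Spec_Bresenham_circle xc yc r out) := by unfold Spec_Bresenham_circle; infer_instance

-- ===== CLAIM (what is proved, stated in full; the proofs are below) =====
def Claim_equal_Bresenham_circle : Prop := ∀ (xc : Int) (yc : Int) (r : Int), Dom_Bresenham_circle xc yc r → Spec_Bresenham_circle xc yc r (Bresenham_circle xc yc r)

-- ===== LEMMAS AND PROOFS =====

-- B's per-step y, as computed inside bresLoopB
def yB (r x : Int) : Int := PySem.Int.floordiv (isqrtB (4 * (r * r - x * x)) + 1) 2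

-- characterization of B's y against s = r^2 - x^2
def Chr (s y : Int) : Prop :=
  0 ≤ y ∧ 4 * s < (2 * y + 1) * (2 * y + 1) ∧ (y = 0 ∨ (2 * y - 1) * (2 * y - 1) ≤ 4 * s)

lemma isqGo_spec (k : Nat) : ∀ n lo hi : Int, (hi - lo).toNat ≤ k → 0 ≤ lo → lo < hi →
    lo * lo ≤ n → n < hi * hi →
    0 ≤ isqGo n lo hi ∧ isqGo n lo hi * isqGo n lo hi ≤ n ∧
      n < (isqGo n lo hi + 1) * (isqGo n lo hi + 1) := by
  induction k with
  | zero =>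
    intro n lo hi hk h0 hlt hl hh
    omega
  | succ k ih =>
    intro n lo hi hk h0 hlt hl hh
    rw [isqGo]
    by_cases hgap : hi - lo > 1
    · rw [dif_pos hgap]
      have hmid := PySem.Int.floordiv_eq_ediv_of_pos (a := lo + hi) (b := 2) (by norm_num)
      have hb : lo < PySem.Int.floordiv (lo + hi) 2 ∧ PySem.Int.floordiv (lo + hi) 2 < hi := by
        rw [hmid]; omega
      by_cases hc : PySem.Int.floordiv (lo + hi) 2 * PySem.Int.floordiv (lo + hi) 2 ≤ n
      · rw [if_pos hc]
        exact ih n _ hi (by omega) (by omega) hb.2 hc hh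
      · rw [if_neg hc]
        exact ih n lo _ (by omega) h0 hb.1 hl (by omega)
    · rw [dif_neg hgap]
      have : hi = lo + 1 := by omega
      refine ⟨h0, hl, ?_⟩
      rw [this] at hh; exact hh

lemma isqrtB_spec (n : Int) (hn : 0 ≤ n) :
    0 ≤ isqrtB n ∧ isqrtB n * isqrtB n ≤ n ∧ n < (isqrtB n + 1) * (isqrtB n + 1) := by
  have := isqGo_spec (n + 1).toNat n 0 (n + 1) (by omega) (by omega) (by omega)
    (by simpa using hn) (by nlinarith)
  exact this

lemma chr_yB (r x : Int) (hs : 0 ≤ r * r - x * x) : Chr (r * r - x * x) (yB r x) := by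
  set s := r * r - x * x with hsdef
  have hq := isqrtB_spec (4 * s) (by omega)
  set q := isqrtB (4 * s) with hqdef
  have hfd : yB r x = (q + 1) / 2 := by
    rw [yB, ← hsdef, ← hqdef, PySem.Int.floordiv_eq_ediv_of_pos (by norm_num)]
  have hy : 2 * yB r x ≤ q + 1 ∧ q + 1 < 2 * yB r x + 2 := by rw [hfd]; omega
  set y := yB r x with hydef
  have hy0 : 0 ≤ y := by omega
  have hcase : q = 2 * y - 1 ∨ q = 2 * y := by omega
  refine ⟨hy0, ?_, ?_⟩
  · rcases hcase with h | h
    · nlinarith [hq.2.2, hy0]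
    · nlinarith [hq.2.2, hy0]
  · rcases hcase with h | h
    · right; nlinarith [hq.2.1]
    · by_cases hz : y = 0
      · left; exact hz
      · right
        have hy1 : 1 ≤ y := by omega
        nlinarith [hq.2.1, hy1]

lemma chr_unique (s y1 y2 : Int) (h1 : Chr s y1) (h2 : Chr s y2) : y1 = y2 := by
  obtain ⟨a0, a1, a2⟩ := h1
  obtain ⟨b0, b1, b2⟩ := h2
  by_contra hne
  rcases lt_or_gt_of_ne hne with h | h
  · rcases b2 with hb | hb
    · omega
    · nlinarith
  · rcases a2 with ha | ha
    · omega
    · nlinarith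

lemma chr_eq_yB (r x s y : Int) (hsdef : s = r * r - x * x) (hs : 0 ≤ s) (hc : Chr s y) :
    y = yB r x := by
  subst hsdef
  exact chr_unique _ _ _ hc (chr_yB r x hs)

-- d < 0 step: y is still B's y at x + 1
lemma step_neg (r x y : Int) (hx : 0 ≤ x) (hc : Chr (r * r - x * x) y)
    (hd : 2 * x * x + 2 * y * y - 2 * r * r + 4 * x - 2 * y + 3 < 0) :
    0 ≤ r * r - (x + 1) * (x + 1) ∧ Chr (r * r - (x + 1) * (x + 1)) y := by
  obtain ⟨h0, h1, _⟩ := hc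
  have hlow : (2 * y - 1) * (2 * y - 1) ≤ 4 * (r * r - (x + 1) * (x + 1)) := by nlinarith
  have hnn : 0 ≤ (2 * y - 1) * (2 * y - 1) := mul_self_nonneg _
  refine ⟨by omega, h0, by nlinarith, Or.inr hlow⟩

-- d ≥ 0 step, inner part: any y' characterized at x + 1 is at most y - 1
lemma step_nonneg_bound (r x y z : Int) (hx : 0 ≤ x) (hxy : x ≤ y)
    (hs : 0 ≤ r * r - x * x) (hc : Chr (r * r - x * x) y)
    (hd : 0 ≤ 2 * x * x + 2 * y * y - 2 * r * r + 4 * x - 2 * y + 3)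
    (hs' : 0 ≤ r * r - (x + 1) * (x + 1)) (hz : Chr (r * r - (x + 1) * (x + 1)) z) :
    z ≤ y - 1 := by
  obtain ⟨h0, h1, h2⟩ := hc
  obtain ⟨g0, g1, g2⟩ := hz
  -- d is odd, hence d ≥ 0 gives d ≥ 1
  obtain ⟨t, ht⟩ : ∃ t, 2 * x * x + 2 * y * y - 2 * r * r + 4 * x - 2 * y + 3 = 2 * t + 3 :=
    ⟨x * x + y * y - r * r + 2 * x - y, by ring⟩
  have hd1 : 1 ≤ 2 * x * x + 2 * y * y - 2 * r * r + 4 * x - 2 * y + 3 := by omega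
  have hupper : 4 * (r * r - (x + 1) * (x + 1)) < (2 * y - 1) * (2 * y - 1) := by nlinarith
  have hy1 : 1 ≤ y := by
    by_contra hy0
    have hy0' : y = 0 := by omega
    subst hy0'
    have hx0 : x = 0 := by omega
    subst hx0
    nlinarith
  by_contra hgt
  have hzy : y ≤ z := by omega
  rcases g2 with hz0 | hz0
  · omega
  · nlinarith

-- d ≥ 0 step with the loop continuing: y - 1 is B's y at x + 1
lemma step_nonneg_cont (r x y : Int) (hx : 0 ≤ x) (hxy2 : x + 1 ≤ y - 1)
    (hc : Chr (r * r - x * x) y)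
    (hd : 0 ≤ 2 * x * x + 2 * y * y - 2 * r * r + 4 * x - 2 * y + 3) :
    0 ≤ r * r - (x + 1) * (x + 1) ∧ Chr (r * r - (x + 1) * (x + 1)) (y - 1) := by
  obtain ⟨h0, h1, h2⟩ := hc
  obtain ⟨t, ht⟩ : ∃ t, 2 * x * x + 2 * y * y - 2 * r * r + 4 * x - 2 * y + 3 = 2 * t + 3 :=
    ⟨x * x + y * y - r * r + 2 * x - y, by ring⟩
  have hd1 : 1 ≤ 2 * x * x + 2 * y * y - 2 * r * r + 4 * x - 2 * y + 3 := by omega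
  have hy2 : 2 ≤ y := by omega
  have hlow0 : (2 * y - 1) * (2 * y - 1) ≤ 4 * (r * r - x * x) := by
    rcases h2 with h | h
    · omega
    · exact h
  have hlow : (2 * (y - 1) - 1) * (2 * (y - 1) - 1) ≤ 4 * (r * r - (x + 1) * (x + 1)) := by
    nlinarith
  have hnn : 0 ≤ (2 * (y - 1) - 1) * (2 * (y - 1) - 1) := mul_self_nonneg _
  refine ⟨by omega, by omega, by nlinarith, Or.inr hlow⟩

-- main loop equivalence: A's (x, y, d) loop versus B's fueled closed-form loop
lemma loop_eq (fuel : Nat) : ∀ (xc yc r x y d : Int) (acc : List (Int × Int)),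
    0 ≤ x →
    d = 2 * x * x + 2 * y * y - 2 * r * r + 4 * x - 2 * y + 3 →
    (x ≤ y ↔ (0 ≤ r * r - x * x ∧ x ≤ yB r x)) →
    (x ≤ y → (y = yB r x ∧ (y - x).toNat < fuel)) →
    bresLoopA xc yc x y d acc = bresLoopB xc yc r fuel x acc := by
  induction fuel with
  | zero =>
    intro xc yc r x y d acc hx hd hiff hcont
    have hxy : ¬ x ≤ y := by intro h; exact absurd (hcont h).2 (by omega)
    rw [bresLoopA, dif_neg hxy, bresLoopB]
  | succ fuel ih =>
    intro xc yc r x y d acc hx hd hiff hcont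
    by_cases hxy : x ≤ y
    · obtain ⟨hyB, hfu⟩ := hcont hxy
      obtain ⟨hs, _⟩ := hiff.mp hxy
      have hcy : Chr (r * r - x * x) y := hyB ▸ chr_yB r x hs
      have hyB' : PySem.Int.floordiv (isqrtB (4 * (r * r - x * x)) + 1) 2 = y := by
        rw [hyB]; rfl
      rw [bresLoopA, dif_pos hxy, bresLoopB]
      rw [if_neg (by omega : ¬ r * r - x * x < 0)]
      rw [hyB', if_neg (by omega : ¬ x > y)]
      have hptseq : plot_circle_points xc yc x y acc =
          acc ++ [(xc + x, yc + y), (xc - x, yc + y), (xc + x, yc - y), (xc - x, yc - y),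
                  (xc + y, yc + x), (xc - y, yc + x), (xc + y, yc - x), (xc - y, yc - x)] := rfl
      by_cases hdneg : d < 0
      · rw [if_pos hdneg, hptseq]
        obtain ⟨hs', hc'⟩ := step_neg r x y hx hcy (hd ▸ hdneg)
        have hyB1 : y = yB r (x + 1) := chr_eq_yB r (x + 1) _ y rfl hs' hc'
        exact ih xc yc r (x + 1) y _ _ (by omega) (by rw [hd]; ring)
          (by constructor
              · intro h; exact ⟨hs', hyB1 ▸ h⟩
              · intro h; exact hyB1 ▸ h.2)
          (fun h => ⟨hyB1, by omega⟩)
      · rw [if_neg hdneg, hptseq]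
        have hd0 : 0 ≤ 2 * x * x + 2 * y * y - 2 * r * r + 4 * x - 2 * y + 3 := by omega
        by_cases hcnt : x + 1 ≤ y - 1
        · obtain ⟨hs', hc'⟩ := step_nonneg_cont r x y hx hcnt hcy hd0
          have hyB1 : y - 1 = yB r (x + 1) := chr_eq_yB r (x + 1) _ (y - 1) rfl hs' hc'
          exact ih xc yc r (x + 1) (y - 1) _ _ (by omega) (by rw [hd]; ring)
            (by constructor
                · intro h; exact ⟨hs', hyB1 ▸ h⟩
                · intro h; exact hyB1 ▸ h.2)
            (fun h => ⟨hyB1, by omega⟩)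
        · exact ih xc yc r (x + 1) (y - 1) _ _ (by omega) (by rw [hd]; ring)
            (by constructor
                · intro h; omega
                · rintro ⟨hs', hle⟩
                  have := step_nonneg_bound r x y (yB r (x + 1)) hx hxy hs hcy hd0 hs'
                    (chr_yB r (x + 1) hs')
                  omega)
            (fun h => absurd h hcnt)
    · have hnb : ¬ (0 ≤ r * r - x * x ∧ x ≤ yB r x) := fun h => hxy (hiff.mpr h)
      rw [bresLoopA, dif_neg hxy, bresLoopB]
      by_cases hs : r * r - x * x < 0
      · rw [if_pos hs]
      · have hgt : x > yB r x := by
          by_contra h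
          exact hnb ⟨by omega, by omega⟩
        rw [if_neg hs,
          if_pos (show x > PySem.Int.floordiv (isqrtB (4 * (r * r - x * x)) + 1) 2 from hgt)]

-- ===== VERDICT (by name: the statement is the Claim_ definition above) =====
theorem Bresenham_circle_spec : Claim_equal_Bresenham_circle := by
  intro xc yc r _
  unfold Spec_Bresenham_circle Bresenham_circle Bresenham_circle_alt
  by_cases hr : r < 0
  · rw [if_pos hr, bresLoopA, dif_neg (by omega : ¬ (0:Int) ≤ r)]
  · rw [if_neg hr]
    have hr0 : 0 ≤ r := by omega
    have hs0 : (0:Int) ≤ r * r - 0 * 0 := by nlinarith [mul_self_nonneg r]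
    have hchr : Chr (r * r - 0 * 0) r := by
      refine ⟨hr0, by nlinarith [hr0], ?_⟩
      by_cases h : r = 0
      · exact Or.inl h
      · have hr1 : 1 ≤ r := by omega
        exact Or.inr (by nlinarith [hr1])
    have hyB0 : r = yB r 0 := chr_eq_yB r 0 _ r rfl hs0 hchr
    exact loop_eq (r.toNat + 2) xc yc r 0 r (3 - 2 * r) [] le_rfl (by ring)
      (by constructor
          · intro _; exact ⟨hs0, hyB0 ▸ hr0⟩
          · intro _; exact hr0)
      (fun _ => ⟨hyB0, by omega⟩)
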